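-- pv_equiv track=rewrite | github.com/SirWerto/prueba_test_darwined | test_asignatura.py | gen_val_prio
-- ===== SOURCE A (Python) =====
-- def gen_val_prio(LenSalas):
--     yield 0
--     Counter = 0
--     i = 1
--     while i < LenSalas+1:
--         Counter += i
--         i += 1
--         yield Counter
-- ===== SOURCE B (Python) =====
-- def gen_val_prio(LenSalas):
--     yield 0
--     for i in range(1, LenSalas + 1):
--         yield i * (i + 1) // 2
-- ===== Notes on version B (the rewrite author's own statement) =====
-- stated objective: simpler
-- what changed: B drops the running-sum accumulator and the manual while-loop counter: it yields the closed-form triangular number i*(i+1)//2 for each i in range(1, LenSalas+1).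
import Mathlib
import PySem

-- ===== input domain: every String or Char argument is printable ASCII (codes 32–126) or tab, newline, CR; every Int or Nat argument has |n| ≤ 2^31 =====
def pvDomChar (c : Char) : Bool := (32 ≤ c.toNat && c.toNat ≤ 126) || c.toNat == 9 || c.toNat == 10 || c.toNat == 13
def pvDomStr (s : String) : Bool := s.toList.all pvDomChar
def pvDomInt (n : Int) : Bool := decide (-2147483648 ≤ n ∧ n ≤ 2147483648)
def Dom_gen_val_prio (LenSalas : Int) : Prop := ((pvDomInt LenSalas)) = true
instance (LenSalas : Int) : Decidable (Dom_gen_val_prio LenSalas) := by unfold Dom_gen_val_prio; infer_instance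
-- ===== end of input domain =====

-- B drops A's running-sum while loop and yields the closed-form triangular number per index (objective: simpler).

-- ===== PORT A =====
-- A's while loop: Counter += i; i += 1; yield Counter.
def genValPrioLoopA (LenSalas Counter i : Int) : List Int :=
  if _h : i < LenSalas + 1 then
    (Counter + i) :: genValPrioLoopA LenSalas (Counter + i) (i + 1)
  else []
termination_by (LenSalas + 1 - i).toNat
decreasing_by omega

def gen_val_prio (LenSalas : Int) : List Int :=
  0 :: genValPrioLoopA LenSalas 0 1

-- ===== PORT B =====
def gen_val_prio_alt (LenSalas : Int) : List Int :=
  0 :: (PySem.List.pyRange 1 (LenSalas + 1) 1).map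
        (fun i => PySem.Int.floordiv (i * (i + 1)) 2)

-- ===== PRECONDITION & SPEC =====
def Spec_gen_val_prio (LenSalas : Int) (out : List Int) : Prop := out = gen_val_prio_alt LenSalas
instance (LenSalas : Int) (out : List Int) : Decidable (Spec_gen_val_prio LenSalas out) := by unfold Spec_gen_val_prio; infer_instance

-- ===== CLAIM (what is proved, stated in full; the proofs are below) =====
def Claim_equal_gen_val_prio : Prop := ∀ (LenSalas : Int), Dom_gen_val_prio LenSalas → Spec_gen_val_prio LenSalas (gen_val_prio LenSalas)

-- ===== LEMMAS AND PROOFS =====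

-- Loop invariant: 2*Counter = (i-1)*i, i.e. Counter is the (i-1)-st triangular number.
theorem genValPrioLoopA_eq (LenSalas : Int) :
    ∀ (n : Nat) (i Counter : Int), (LenSalas + 1 - i).toNat = n →
      2 * Counter = (i - 1) * i →
      genValPrioLoopA LenSalas Counter i =
        (PySem.List.pyRange i (LenSalas + 1) 1).map
          (fun j => PySem.Int.floordiv (j * (j + 1)) 2) := by
  intro n
  induction n with
  | zero =>
    intro i Counter hn _
    rw [genValPrioLoopA, PySem.List.pyRange_one_eq_nil (by omega)]
    simp [show ¬ i < LenSalas + 1 by omega]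
  | succ n ih =>
    intro i Counter hn hinv
    have hi : i < LenSalas + 1 := by omega
    rw [genValPrioLoopA, PySem.List.pyRange_one_cons hi]
    simp only [hi, dif_pos, List.map_cons]
    have hval : PySem.Int.floordiv (i * (i + 1)) 2 = Counter + i := by
      rw [PySem.Int.floordiv_eq_iff_of_pos (by omega)]
      constructor <;> nlinarith
    rw [hval, ih (i + 1) (Counter + i) (by omega) (by ring_nf; ring_nf at hinv; omega)]

-- ===== VERDICT (by name: the statement is the Claim_ definition above) =====
theorem gen_val_prio_spec : Claim_equal_gen_val_prio := by
  intro LenSalas _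
  unfold Spec_gen_val_prio gen_val_prio gen_val_prio_alt
  rw [genValPrioLoopA_eq LenSalas (LenSalas + 1 - 1).toNat 1 0 rfl (by ring)]
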